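-- pv_equiv track=rewrite | github.com/zealot-zew/29_codename-change_Surveillance-and-Security-Systems | incidencyMatrix.py | find_vertices
-- ===== SOURCE A (Python) =====
-- def find_vertices(coords):
--     vertices = []
--     if len(coords) < 2:
--         return coords
--
--     # First coordinate is always a vertex
--     vertices.append(coords[0])
--
--     # Traverse the coordinates to find turning points
--     for i in range(1, len(coords) - 1):  # Exclude last point
--         prev_point = coords[i - 1]
--         curr_point = coords[i]
--         next_point = coords[i + 1]
--
--         # Check if the direction changes (either x or y changes direction)
--         if (prev_point[0] == curr_point[0] and curr_point[0] != next_point[0]) or \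
--            (prev_point[1] == curr_point[1] and curr_point[1] != next_point[1]):
--             vertices.append(curr_point)
--
--     return vertices
-- ===== SOURCE B (Python) =====
-- def _run_ends(vals):
--     # indices that end a maximal run of >=2 equal values, with a differing value after
--     ends = []
--     start = 0
--     for i in range(1, len(vals)):
--         if vals[i] != vals[start]:
--             if i - start >= 2:
--                 ends.append(i - 1)
--             start = i
--     return ends
--
--
-- def find_vertices(coords):
--     if len(coords) < 2:
--         return coords
--     xs = [p[0] for p in coords]
--     ys = [p[1] for p in coords]
--     keep = sorted(set(_run_ends(xs) + _run_ends(ys)))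
--     return [coords[0]] + [coords[i] for i in keep]
-- ===== Notes on version B (the rewrite author's own statement) =====
-- stated objective: alternative
-- what changed: A's single sliding-window scan over index triples is replaced by run-length analysis: per axis, collect the indices that end a maximal run of >=2 equal coordinate values, take the sorted union of the two index sets, and index back into coords (prepending coords[0]).
import Mathlib
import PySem

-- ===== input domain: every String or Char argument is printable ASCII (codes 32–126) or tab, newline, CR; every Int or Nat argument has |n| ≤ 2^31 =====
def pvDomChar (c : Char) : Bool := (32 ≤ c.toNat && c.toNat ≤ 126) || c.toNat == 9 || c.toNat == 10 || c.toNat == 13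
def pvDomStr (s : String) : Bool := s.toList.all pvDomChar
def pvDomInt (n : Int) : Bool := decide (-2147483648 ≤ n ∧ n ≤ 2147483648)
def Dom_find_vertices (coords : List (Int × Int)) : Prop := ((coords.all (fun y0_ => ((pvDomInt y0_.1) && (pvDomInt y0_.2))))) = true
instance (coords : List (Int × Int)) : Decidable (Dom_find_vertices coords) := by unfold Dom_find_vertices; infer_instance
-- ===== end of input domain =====

-- B replaces A's sliding-window scan by per-axis run-length analysis (run-end indices,
-- sorted set union, index back into coords); objective: alternative algorithm, same result.

-- ===== PORT A =====
def find_vertices (coords : List (Int × Int)) : List (Int × Int) :=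
  if coords.length < 2 then coords
  else
    (PySem.List.pyRange 1 ((coords.length : Int) - 1) 1).foldl
      (fun vertices i =>
        let prev_point := PySem.List.pyGetD coords (i - 1) (0, 0)
        let curr_point := PySem.List.pyGetD coords i (0, 0)
        let next_point := PySem.List.pyGetD coords (i + 1) (0, 0)
        if (prev_point.1 == curr_point.1 && curr_point.1 != next_point.1)
            || (prev_point.2 == curr_point.2 && curr_point.2 != next_point.2)
        then vertices ++ [curr_point] else vertices)
      [PySem.List.pyGetD coords 0 (0, 0)]

-- ===== PORT B =====
-- B's loop body for _run_ends (state = (ends, start)); indices are the Nat values of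
-- Python's nonnegative loop counters.
def pvStep (vals : List Int) (st : List Nat × Nat) (i : Nat) : List Nat × Nat :=
  if vals.getD i 0 != vals.getD st.2 0 then
    ((if st.2 + 2 ≤ i then st.1 ++ [i - 1] else st.1), i)
  else st

-- _run_ends: indices ending a maximal run of >= 2 equal values with a differing value after
def pvRunEnds (vals : List Int) : List Nat :=
  ((List.range' 1 (vals.length - 1)).foldl (pvStep vals) ([], 0)).1

def find_vertices_alt (coords : List (Int × Int)) : List (Int × Int) :=
  if coords.length < 2 then coords
  else
    let xs := coords.map Prod.fst
    let ys := coords.map Prod.snd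
    let keep := PySem.List.sorted (PySem.Set.ofList (pvRunEnds xs ++ pvRunEnds ys)) (fun x => x) false
    PySem.List.pyGetD coords 0 (0, 0) :: keep.map (fun i => coords.getD i (0, 0))

-- ===== PRECONDITION & SPEC =====
def Spec_find_vertices (coords : List (Int × Int)) (out : List (Int × Int)) : Prop := out = find_vertices_alt coords
instance (coords : List (Int × Int)) (out : List (Int × Int)) : Decidable (Spec_find_vertices coords out) := by unfold Spec_find_vertices; infer_instance

-- ===== CLAIM (what is proved, stated in full; the proofs are below) =====
def Claim_equal_find_vertices : Prop := ∀ (coords : List (Int × Int)), Dom_find_vertices coords → Spec_find_vertices coords (find_vertices coords)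

-- ===== LEMMAS AND PROOFS =====

-- the turning-point predicate on a point triple and the shared recursive walk
def pvCond (p c n : Int × Int) : Bool :=
  (p.1 == c.1 && c.1 != n.1) || (p.2 == c.2 && c.2 != n.2)

def pvWalk : (Int × Int) → (Int × Int) → List (Int × Int) → List (Int × Int)
  | _, _, [] => []
  | p, c, n :: rest => (if pvCond p c n then [c] else []) ++ pvWalk c n rest

-- one-axis window predicate at index j (what a run end means pointwise)
def pvWin (vals : List Int) (j : Nat) : Bool :=
  (vals.getD (j - 1) 0 == vals.getD j 0) && (vals.getD j 0 != vals.getD (j + 1) 0)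

-- ---- A-side characterisation (indexed loop → pvWalk) ----

theorem pvA_key : ∀ (rest : List (Int × Int)) (p0 c1 : Int × Int),
    ((List.range rest.length).filter
        (fun k => pvCond ((p0 :: c1 :: rest).getD k (0, 0))
          ((p0 :: c1 :: rest).getD (k + 1) (0, 0)) ((p0 :: c1 :: rest).getD (k + 2) (0, 0)))).map
      (fun k => (p0 :: c1 :: rest).getD (k + 1) (0, 0))
      = pvWalk p0 c1 rest := by
  intro rest
  induction rest with
  | nil => intro p0 c1; rfl
  | cons n r ih =>
    intro p0 c1
    rw [List.length_cons, List.range_succ_eq_map, List.filter_cons]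
    have e1 : ((fun k => pvCond ((p0 :: c1 :: n :: r).getD k (0, 0))
          ((p0 :: c1 :: n :: r).getD (k + 1) (0, 0))
          ((p0 :: c1 :: n :: r).getD (k + 2) (0, 0))) ∘ Nat.succ)
        = (fun k => pvCond ((c1 :: n :: r).getD k (0, 0))
          ((c1 :: n :: r).getD (k + 1) (0, 0)) ((c1 :: n :: r).getD (k + 2) (0, 0))) := by
      funext k
      simp only [Function.comp_apply, Nat.succ_eq_add_one, List.getD_cons_succ]
    have e2 : ((fun k => (p0 :: c1 :: n :: r).getD (k + 1) (0, 0)) ∘ Nat.succ)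
        = (fun k => (c1 :: n :: r).getD (k + 1) (0, 0)) := by
      funext k
      simp only [Function.comp_apply, Nat.succ_eq_add_one, List.getD_cons_succ]
    have hhead : pvCond ((p0 :: c1 :: n :: r).getD 0 (0, 0))
        ((p0 :: c1 :: n :: r).getD (0 + 1) (0, 0)) ((p0 :: c1 :: n :: r).getD (0 + 2) (0, 0))
        = pvCond p0 c1 n := by norm_num [List.getD_cons_succ]
    by_cases h : pvCond p0 c1 n = true
    · rw [if_pos (by rw [hhead]; exact h)]
      rw [List.map_cons, List.filter_map, List.map_map, e1, e2, ih c1 n]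
      simp [pvWalk, h]
    · rw [if_neg (by rw [hhead]; exact h)]
      rw [List.filter_map, List.map_map, e1, e2, ih c1 n]
      simp [pvWalk, h]

theorem pvA_eq (p0 c1 : Int × Int) (rest : List (Int × Int)) :
    find_vertices (p0 :: c1 :: rest) = p0 :: pvWalk p0 c1 rest := by
  have hlen : ¬ (p0 :: c1 :: rest).length < 2 := by simp
  have hr : (((p0 :: c1 :: rest).length : Int) - 1) = ((rest.length + 1 : Nat) : Int) := by
    simp
  have i2 : ∀ k : Nat, (1 : Int) + (k : Int) = ((k + 1 : Nat) : Int) := by intro k; omega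
  have i4 : ∀ k : Nat, ((k + 1 : Nat) : Int) + 1 = ((k + 2 : Nat) : Int) := by intro k; omega
  have i5 : ∀ k : Nat, ((k + 1 : Nat) : Int) - 1 = ((k : Nat) : Int) := by intro k; omega
  simp only [find_vertices, if_neg hlen, hr, PySem.List.pyRange_one, List.foldl_map,
    i2, i4, i5, PySem.List.pyGetD_natCast, Int.toNat_natCast]
  show List.foldl
      (fun acc k =>
        if pvCond ((p0 :: c1 :: rest).getD k (0, 0)) ((p0 :: c1 :: rest).getD (k + 1) (0, 0))
            ((p0 :: c1 :: rest).getD (k + 2) (0, 0))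
        then acc ++ [(p0 :: c1 :: rest).getD (k + 1) (0, 0)] else acc)
      [PySem.List.pyGetD (p0 :: c1 :: rest) 0 (0, 0)] (List.range rest.length)
      = p0 :: pvWalk p0 c1 rest
  rw [PySem.List.foldl_append_if
      (fun k => pvCond ((p0 :: c1 :: rest).getD k (0, 0)) ((p0 :: c1 :: rest).getD (k + 1) (0, 0))
        ((p0 :: c1 :: rest).getD (k + 2) (0, 0)))
      (fun k => (p0 :: c1 :: rest).getD (k + 1) (0, 0))]
  rw [pvA_key]
  simp [PySem.List.pyGetD_zero_cons]

-- ---- B-side characterisation (run-end loop → window filter) ----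

-- loop invariant for _run_ends: start is the beginning of the current run
theorem pvRunLoop (vals : List Int) : ∀ (m i : Nat) (ends : List Nat) (start : Nat),
    1 ≤ i → start < i →
    (∀ k, start ≤ k → k < i → vals.getD k 0 = vals.getD start 0) →
    (start = 0 ∨ vals.getD (start - 1) 0 ≠ vals.getD start 0) →
    ((List.range' i m).foldl (pvStep vals) (ends, start)).1
      = ends ++ (List.range' (i - 1) m).filter (fun j => decide (1 ≤ j) && pvWin vals j) := by
  intro m
  induction m with
  | zero => intro i ends start _ _ _ _; simp
  | succ m ih =>
    intro i ends start hi hsi hrun hbrk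
    rw [List.range'_succ, List.foldl_cons]
    have hrange : List.range' (i - 1) (m + 1) = (i - 1) :: List.range' i m := by
      rw [List.range'_succ, Nat.sub_add_cancel hi]
    rw [hrange, List.filter_cons]
    by_cases h : vals.getD i 0 = vals.getD start 0
    · -- same run continues: nothing appended, and the window test at i-1 is false (or j = 0)
      have hstep : pvStep vals (ends, start) i = (ends, start) := by
        simp only [pvStep]
        rw [if_neg (fun hc => (bne_iff_ne.mp hc) h)]
      have hP : (decide (1 ≤ i - 1) && pvWin vals (i - 1)) = false := by
        by_cases h1 : 1 ≤ i - 1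
        · have heq : vals.getD (i - 1 + 1) 0 = vals.getD (i - 1) 0 := by
            rw [Nat.sub_add_cancel hi]
            exact h.trans ((hrun _ (by omega) (by omega)).symm)
          simp only [pvWin, heq, bne_self_eq_false, Bool.and_false]
        · have hd : decide (1 ≤ i - 1) = false := by
            simp only [decide_eq_false_iff_not]; omega
          rw [hd, Bool.false_and]
      rw [hstep, if_neg (by simp [hP]),
        ih (i + 1) ends start (by omega) (by omega)
          (fun k hk1 hk2 => by
            rcases Nat.lt_or_ge k i with hk | hk
            · exact hrun k hk1 hk
            · have hki : k = i := by omega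
              rw [hki, h]) hbrk]
      simp
    · -- run breaks at i
      have hprev : vals.getD (i - 1) 0 = vals.getD start 0 := hrun _ (by omega) (by omega)
      have hnewbrk : i = 0 ∨ vals.getD (i - 1) 0 ≠ vals.getD i 0 := by
        right; rw [hprev]; exact fun hc => h hc.symm
      have hnewrun : ∀ k, i ≤ k → k < i + 1 → vals.getD k 0 = vals.getD i 0 := by
        intro k hk1 hk2
        have hki : k = i := by omega
        rw [hki]
      by_cases hs : start + 2 ≤ i
      · -- run had length >= 2: append i - 1, and the window test at i-1 is true
        have hstep : pvStep vals (ends, start) i = (ends ++ [i - 1], i) := by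
          simp only [pvStep]
          rw [if_pos (by simpa using h), if_pos hs]
        have hP : (decide (1 ≤ i - 1) && pvWin vals (i - 1)) = true := by
          have hvm2 : vals.getD (i - 1 - 1) 0 = vals.getD (i - 1) 0 :=
            (hrun _ (by omega) (by omega)).trans hprev.symm
          have hne2 : vals.getD (i - 1) 0 ≠ vals.getD (i - 1 + 1) 0 := by
            rw [Nat.sub_add_cancel hi, hprev]; exact fun hc => h hc.symm
          have hd : decide (1 ≤ i - 1) = true := by
            simp only [decide_eq_true_eq]; omega
          simp only [pvWin, hd, Bool.true_and, hvm2, beq_self_eq_true]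
          exact bne_iff_ne.mpr hne2
        rw [hstep, if_pos hP,
          ih (i + 1) (ends ++ [i - 1]) i (by omega) (by omega) hnewrun hnewbrk]
        simp
      · -- run had length 1: nothing appended, window test at i-1 is false (or j = 0)
        have hstartv : start = i - 1 := by omega
        have hstep : pvStep vals (ends, start) i = (ends, i) := by
          simp only [pvStep]
          rw [if_pos (by simpa using h), if_neg hs]
        have hP : (decide (1 ≤ i - 1) && pvWin vals (i - 1)) = false := by
          by_cases h1 : 1 ≤ i - 1
          · rcases hbrk with h0 | hne
            · omega
            · rw [hstartv] at hne
              have hbeq : (vals.getD (i - 1 - 1) 0 == vals.getD (i - 1) 0) = false :=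
                beq_eq_false_iff_ne.mpr hne
              simp only [pvWin, hbeq, Bool.false_and, Bool.and_false]
          · have hd : decide (1 ≤ i - 1) = false := by
              simp only [decide_eq_false_iff_not]; omega
            rw [hd, Bool.false_and]
        rw [hstep, if_neg (by simp [hP]),
          ih (i + 1) ends i (by omega) (by omega) hnewrun hnewbrk]
        simp

theorem pvRunEnds_spec (vals : List Int) (h2 : 2 ≤ vals.length) :
    pvRunEnds vals = (List.range' 1 (vals.length - 2)).filter (pvWin vals) := by
  unfold pvRunEnds
  rw [pvRunLoop vals (vals.length - 1) 1 [] 0 le_rfl Nat.zero_lt_one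
      (fun k hk1 hk2 => by
        have hk : k = 0 := by omega
        rw [hk]) (Or.inl rfl)]
  rw [List.nil_append, show (1 : Nat) - 1 = 0 from rfl,
    show vals.length - 1 = (vals.length - 2) + 1 from by omega, List.range'_succ,
    List.filter_cons, if_neg (by simp), show (0 : Nat) + 1 = 1 from rfl]
  exact List.filter_congr (fun j hj => by
    have h1 := (List.mem_range'_1.mp hj).1
    simp only [decide_eq_true h1, Bool.true_and])

theorem pvGetD_map_fst (coords : List (Int × Int)) (j : Nat) :
    (coords.map Prod.fst).getD j 0 = (coords.getD j (0, 0)).1 := by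
  simp only [List.getD_eq_getElem?_getD, List.getElem?_map]
  cases coords[j]? <;> simp

theorem pvGetD_map_snd (coords : List (Int × Int)) (j : Nat) :
    (coords.map Prod.snd).getD j 0 = (coords.getD j (0, 0)).2 := by
  simp only [List.getD_eq_getElem?_getD, List.getElem?_map]
  cases coords[j]? <;> simp

-- sorted set-union of two filters of a strictly increasing list is the filter of the disjunction
theorem pvKeep (R : List Nat) (hR : R.Pairwise (· < ·)) (p q : Nat → Bool) :
    PySem.List.sorted (PySem.Set.ofList (R.filter p ++ R.filter q)) (fun x => x) false
      = R.filter (fun j => p j || q j) := by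
  apply PySem.List.sorted_eq_of_perm_of_pairwise_lt
  · apply (List.perm_ext_iff_of_nodup
      (((hR.filter _).imp (fun h => Nat.ne_of_lt h)))
      (PySem.Set.nodup_ofList _)).mpr
    intro a
    simp only [PySem.Set.mem_ofList, List.mem_append, List.mem_filter, Bool.or_eq_true]
    tauto
  · exact hR.filter _

theorem pvB_eq (p0 c1 : Int × Int) (rest : List (Int × Int)) :
    find_vertices_alt (p0 :: c1 :: rest) = p0 :: pvWalk p0 c1 rest := by
  have hlen : ¬ (p0 :: c1 :: rest).length < 2 := by simp
  have hxlen : ((p0 :: c1 :: rest).map Prod.fst).length - 2 = rest.length := by simp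
  have hylen : ((p0 :: c1 :: rest).map Prod.snd).length - 2 = rest.length := by simp
  unfold find_vertices_alt
  rw [if_neg hlen]
  show (PySem.List.pyGetD (p0 :: c1 :: rest) 0 (0, 0) ::
      List.map (fun i => (p0 :: c1 :: rest).getD i (0, 0))
        (PySem.List.sorted
          (PySem.Set.ofList (pvRunEnds ((p0 :: c1 :: rest).map Prod.fst)
            ++ pvRunEnds ((p0 :: c1 :: rest).map Prod.snd)))
          (fun x => x) false))
    = p0 :: pvWalk p0 c1 rest
  rw [pvRunEnds_spec ((p0 :: c1 :: rest).map Prod.fst) (by simp),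
    pvRunEnds_spec ((p0 :: c1 :: rest).map Prod.snd) (by simp), hxlen, hylen,
    pvKeep _ (List.pairwise_lt_range' ..),
    List.range'_eq_map_range, List.filter_map, List.map_map]
  have h1 : ((fun j => pvWin ((p0 :: c1 :: rest).map Prod.fst) j
        || pvWin ((p0 :: c1 :: rest).map Prod.snd) j) ∘ (fun k => 1 + k))
      = (fun k => pvCond ((p0 :: c1 :: rest).getD k (0, 0))
          ((p0 :: c1 :: rest).getD (k + 1) (0, 0)) ((p0 :: c1 :: rest).getD (k + 2) (0, 0))) := by
    funext k
    have e2 : 1 + k = k + 1 := by omega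
    simp only [Function.comp_apply, pvWin, pvCond, e2,
      pvGetD_map_fst, pvGetD_map_snd, Nat.add_sub_cancel]
  have h2 : ((fun i => (p0 :: c1 :: rest).getD i (0, 0)) ∘ (fun k => 1 + k))
      = (fun k => (p0 :: c1 :: rest).getD (k + 1) (0, 0)) := by
    funext k
    have e2 : 1 + k = k + 1 := by omega
    simp only [Function.comp_apply, e2]
  rw [h1, h2, pvA_key]
  simp [PySem.List.pyGetD_zero_cons]

-- ===== VERDICT (by name: the statement is the Claim_ definition above) =====
theorem find_vertices_spec : Claim_equal_find_vertices := by
  intro coords _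
  unfold Spec_find_vertices
  match coords with
  | [] => rfl
  | [x] => rfl
  | p0 :: c1 :: rest => rw [pvA_eq, pvB_eq]
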